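-- pv_equiv track=rewrite | github.com/ohong/sports-broadcast | py/main.py | resolve_voice_id
-- ===== SOURCE A (Python) =====
-- from typing import Any, Dict, Iterable, List, Optional, Sequence
--
-- def normalize_commentator_key(value: Optional[str]) -> str:
--     if not value:
--         return ""
--     return (
--         value.strip()
--         .lower()
--         .replace(" ", "")
--         .replace("_", "")
--         .replace("-", "")
--     )
--
-- def resolve_voice_id(commentator_key: str, voice_map: Dict[str, str]) -> str:
--     normalized = normalize_commentator_key(commentator_key)
--     raw_key = commentator_key.strip() if commentator_key else ""
--     candidate_keys = [
--         raw_key,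
--         raw_key.lower(),
--         normalized,
--     ]
--
--     for key in candidate_keys:
--         if not key:
--             continue
--         voice = voice_map.get(key)
--         if voice:
--             return voice
--
--     if normalized.startswith("analyst"):
--         voice = voice_map.get("analyst") or voice_map.get("color")
--         if voice:
--             return voice
--     if normalized.startswith("play"):
--         voice = voice_map.get("playByPlay") or voice_map.get("playbyplay") or voice_map.get("pbp")
--         if voice:
--             return voice
--
--     default_voice = voice_map.get("default")
--     if default_voice:
--         return default_voice
--
--     if voice_map:
--         return next(iter(voice_map.values()))
--
--     raise ValueError("No voice IDs configured for commentary synthesis.")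
-- ===== SOURCE B (Python) =====
-- def resolve_voice_id(commentator_key: str, voice_map: dict) -> str:
--     raw = commentator_key.strip() if commentator_key else ""
--     normalized = raw.lower().replace(" ", "").replace("_", "").replace("-", "")
--     # Assign each candidate key a precedence rank (smaller = higher priority).
--     priority = {}
--     for key in (raw, raw.lower(), normalized):
--         if key and key not in priority:
--             priority[key] = len(priority)
--     fallbacks = []
--     if normalized.startswith("analyst"):
--         fallbacks += ["analyst", "color"]
--     if normalized.startswith("play"):
--         fallbacks += ["playByPlay", "playbyplay", "pbp"]
--     fallbacks.append("default")
--     for key in fallbacks: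
--         if key not in priority:
--             priority[key] = len(priority)
--     # Single pass over the voice map: keep the truthy voice with the lowest rank.
--     best = None  # (rank, voice)
--     for key, voice in voice_map.items():
--         if voice:
--             rank = priority.get(key)
--             if rank is not None and (best is None or rank < best[0]):
--                 best = (rank, voice)
--     if best is not None:
--         return best[1]
--     if voice_map:
--         return next(iter(voice_map.values()))
--     raise ValueError("No voice IDs configured for commentary synthesis.")
-- ===== Notes on version B (the rewrite author's own statement) =====
-- stated objective: alternative
-- what changed: B inverts the traversal: instead of probing the dict once per candidate key through staged branches, it assigns every candidate key a precedence rank in one table and then makes a single pass over the voice-map entries keeping the truthy value with the lowest rank.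
import Mathlib
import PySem

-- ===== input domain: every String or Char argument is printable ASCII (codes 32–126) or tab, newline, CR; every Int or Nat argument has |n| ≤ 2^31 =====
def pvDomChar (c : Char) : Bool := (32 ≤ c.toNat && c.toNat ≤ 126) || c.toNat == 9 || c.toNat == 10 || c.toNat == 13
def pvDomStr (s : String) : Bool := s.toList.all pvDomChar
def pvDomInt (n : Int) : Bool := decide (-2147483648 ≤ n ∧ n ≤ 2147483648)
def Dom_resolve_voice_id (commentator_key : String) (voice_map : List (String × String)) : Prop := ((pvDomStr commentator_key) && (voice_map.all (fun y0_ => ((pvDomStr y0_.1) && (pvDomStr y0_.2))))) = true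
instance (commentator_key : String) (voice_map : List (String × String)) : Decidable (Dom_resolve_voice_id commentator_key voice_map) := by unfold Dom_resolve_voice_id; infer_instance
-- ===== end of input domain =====

-- B replaces A's repeated dict probes (candidate loop, two prefix-fallback if-blocks, default
-- lookup) by a rank table over all candidate keys and ONE pass over the voice-map entries keeping
-- the truthy value of lowest rank (objective: alternative). Equivalence of the RETURN value is
-- proved on Pre_ (non-empty map with distinct keys; see the comment at Pre_).

-- ===== PORT A =====
-- dict.get on the association-list representation of a dict (first match)
def pvGet? : List (String × String) → String → Option String
  | [], _ => none
  | (k, v) :: rest, key => if k = key then some v else pvGet? rest key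

-- Python `a or b` on two Optional[str] values (a falsy iff None or "")
def pvPyOr (a b : Option String) : Option String :=
  match a with
  | some v => if v = "" then b else some v
  | none => b

-- `if voice:` — keep an Optional[str] only if truthy
def pvTruthy (a : Option String) : Option String :=
  match a with
  | some v => if v = "" then none else some v
  | none => none

-- `for key in candidate_keys: if not key: continue; voice = voice_map.get(key); if voice: return voice`
def pvLoopA : List String → List (String × String) → Option String
  | [], _ => none
  | key :: rest, vm =>
      if key = "" then pvLoopA rest vm
      else
        match pvGet? vm key with
        | some voice => if voice = "" then pvLoopA rest vm else some voice
        | none => pvLoopA rest vm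

def normalize_commentator_key (value : String) : String :=
  if value = "" then ""
  else PySem.Str.replace (PySem.Str.replace (PySem.Str.replace (PySem.Str.lower (PySem.Str.strip value)) " " "") "_" "") "-" ""

def resolve_voice_id (commentator_key : String) (voice_map : List (String × String)) : String :=
  let normalized := normalize_commentator_key commentator_key
  let raw_key := if commentator_key = "" then "" else PySem.Str.strip commentator_key
  let candidate_keys := [raw_key, PySem.Str.lower raw_key, normalized]
  match pvLoopA candidate_keys voice_map with
  | some voice => voice
  | none =>
    match (if PySem.Str.startswith normalized "analyst" then
             pvTruthy (pvPyOr (pvGet? voice_map "analyst") (pvGet? voice_map "color"))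
           else none) with
    | some voice => voice
    | none =>
      match (if PySem.Str.startswith normalized "play" then
               pvTruthy (pvPyOr (pvPyOr (pvGet? voice_map "playByPlay") (pvGet? voice_map "playbyplay")) (pvGet? voice_map "pbp"))
             else none) with
      | some voice => voice
      | none =>
        match pvTruthy (pvGet? voice_map "default") with
        | some voice => voice
        | none =>
          match voice_map with
          | (_, v) :: _ => v      -- next(iter(voice_map.values()))
          | [] => ""              -- Python raises ValueError here; excluded by Pre_

-- ===== PORT B =====
-- priority.get on the association-list representation of the rank dict
def pvGetN? : List (String × Nat) → String → Option Nat
  | [], _ => none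
  | (k, r) :: rest, key => if k = key then some r else pvGetN? rest key

-- `if key and key not in priority: priority[key] = len(priority)`
def pvPrioAdd1 (p : List (String × Nat)) (k : String) : List (String × Nat) :=
  if k ≠ "" ∧ pvGetN? p k = none then p ++ [(k, p.length)] else p

-- `if key not in priority: priority[key] = len(priority)`
def pvPrioAdd2 (p : List (String × Nat)) (k : String) : List (String × Nat) :=
  if pvGetN? p k = none then p ++ [(k, p.length)] else p

-- `for key, voice in voice_map.items(): if voice: rank = priority.get(key);
--  if rank is not None and (best is None or rank < best[0]): best = (rank, voice)`
def pvBest : List (String × String) → List (String × Nat) → Option (Nat × String) → Option (Nat × String)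
  | [], _, best => best
  | (k, v) :: rest, p, best =>
      if v ≠ "" then
        match pvGetN? p k with
        | some r =>
            pvBest rest p
              (if (match best with | none => true | some b => decide (r < b.1)) then some (r, v) else best)
        | none => pvBest rest p best
      else pvBest rest p best

def resolve_voice_id_alt (commentator_key : String) (voice_map : List (String × String)) : String :=
  let raw := if commentator_key = "" then "" else PySem.Str.strip commentator_key
  let normalized := PySem.Str.replace (PySem.Str.replace (PySem.Str.replace (PySem.Str.lower raw) " " "") "_" "") "-" ""
  let priority := [raw, PySem.Str.lower raw, normalized].foldl pvPrioAdd1 []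
  let fallbacks := (if PySem.Str.startswith normalized "analyst" then ["analyst", "color"] else []) ++
                   (if PySem.Str.startswith normalized "play" then ["playByPlay", "playbyplay", "pbp"] else []) ++
                   ["default"]
  let priority := fallbacks.foldl pvPrioAdd2 priority
  match pvBest voice_map priority none with
  | some b => b.2
  | none =>
    match voice_map with
    | (_, v) :: _ => v          -- next(iter(voice_map.values()))
    | [] => ""                  -- Python raises ValueError here; excluded by Pre_

-- ===== PRECONDITION & SPEC =====
-- Pre_ excludes the empty voice map, on which Python A raises ValueError (B raises the same), and
-- duplicate-key association lists, which cannot arise as the image of a Python dict (voice_map is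
-- a dict; its assoc-list representation always has distinct keys).
def Pre_resolve_voice_id (commentator_key : String) (voice_map : List (String × String)) : Prop :=
  voice_map ≠ [] ∧ (voice_map.map Prod.fst).Nodup
instance (commentator_key : String) (voice_map : List (String × String)) : Decidable (Pre_resolve_voice_id commentator_key voice_map) := by unfold Pre_resolve_voice_id; infer_instance

def pvWitness_resolve_voice_id : String × (List (String × String)) := ("Analyst 1", [("analyst", "vA"), ("default", "vD")])

def Spec_resolve_voice_id (commentator_key : String) (voice_map : List (String × String)) (out : String) : Prop := out = resolve_voice_id_alt commentator_key voice_map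
instance (commentator_key : String) (voice_map : List (String × String)) (out : String) : Decidable (Spec_resolve_voice_id commentator_key voice_map out) := by unfold Spec_resolve_voice_id; infer_instance

-- ===== CLAIM (what is proved, stated in full; the proofs are below) =====
def Claim_equal_resolve_voice_id : Prop := ∀ (commentator_key : String) (voice_map : List (String × String)), Dom_resolve_voice_id commentator_key voice_map → Pre_resolve_voice_id commentator_key voice_map → Spec_resolve_voice_id commentator_key voice_map (resolve_voice_id commentator_key voice_map)

-- ===== LEMMAS AND PROOFS =====

-- proof-side abbreviations for the shared candidate data
def pvRawOf (ck : String) : String := if ck = "" then "" else PySem.Str.strip ck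
def pvNormOf (ck : String) : String :=
  PySem.Str.replace (PySem.Str.replace (PySem.Str.replace (PySem.Str.lower (pvRawOf ck)) " " "") "_" "") "-" ""
def pvFallbacksOf (ck : String) : List String :=
  (if PySem.Str.startswith (pvNormOf ck) "analyst" then ["analyst", "color"] else []) ++
  (if PySem.Str.startswith (pvNormOf ck) "play" then ["playByPlay", "playbyplay", "pbp"] else []) ++
  ["default"]
def pvCandsOf (ck : String) : List String :=
  [pvRawOf ck, PySem.Str.lower (pvRawOf ck), pvNormOf ck] ++ pvFallbacksOf ck
def pvRest (vm : List (String × String)) : String :=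
  match vm with | (_, v) :: _ => v | [] => ""

-- ===== A-side lemmas =====

theorem pvLoopA_append (l₁ l₂ : List String) (vm : List (String × String)) :
    pvLoopA (l₁ ++ l₂) vm =
      (match pvLoopA l₁ vm with
       | some v => some v
       | none => pvLoopA l₂ vm) := by
  induction l₁ with
  | nil => rfl
  | cons k rest ih =>
    by_cases hk : k = ""
    · simp [pvLoopA, hk, ih]
    · cases h : pvGet? vm k with
      | none => simp [pvLoopA, hk, h, ih]
      | some v => by_cases hv : v = "" <;> simp [pvLoopA, hk, h, hv, ih]

theorem pvLoopA_analyst (vm : List (String × String)) :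
    pvLoopA ["analyst", "color"] vm =
      pvTruthy (pvPyOr (pvGet? vm "analyst") (pvGet? vm "color")) := by
  cases h1 : pvGet? vm "analyst" <;> cases h2 : pvGet? vm "color" <;>
    simp [pvLoopA, pvPyOr, pvTruthy, h1, h2] <;> split_ifs <;> simp_all

theorem pvLoopA_play (vm : List (String × String)) :
    pvLoopA ["playByPlay", "playbyplay", "pbp"] vm =
      pvTruthy (pvPyOr (pvPyOr (pvGet? vm "playByPlay") (pvGet? vm "playbyplay")) (pvGet? vm "pbp")) := by
  cases h1 : pvGet? vm "playByPlay" <;> cases h2 : pvGet? vm "playbyplay" <;> cases h3 : pvGet? vm "pbp" <;>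
    simp [pvLoopA, pvPyOr, pvTruthy, h1, h2, h3] <;> split_ifs <;> simp_all

theorem pvLoopA_default (vm : List (String × String)) :
    pvLoopA ["default"] vm = pvTruthy (pvGet? vm "default") := by
  cases h : pvGet? vm "default" <;>
    simp [pvLoopA, pvTruthy, h]

theorem pvNormalized_eq (ck : String) :
    normalize_commentator_key ck = pvNormOf ck := by
  unfold normalize_commentator_key pvNormOf pvRawOf
  by_cases h : ck = ""
  · simp only [h, if_pos]
    decide
  · simp [h]

theorem pvMatchFlatten (a b : Option String) (k : String) :
    (match (match a with | some v => some v | none => b) with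
     | some voice => voice
     | none => k) =
    (match a with
     | some voice => voice
     | none => match b with | some voice => voice | none => k) := by
  cases a <;> rfl

-- A's result is a single first-hit scan of the full candidate list, then the fallback value
theorem pvA_char (ck : String) (vm : List (String × String)) :
    resolve_voice_id ck vm =
      (match pvLoopA (pvCandsOf ck) vm with
       | some v => v
       | none => pvRest vm) := by
  unfold resolve_voice_id pvCandsOf pvFallbacksOf pvRest
  simp only [pvNormalized_eq, pvRawOf]
  by_cases ha : PySem.Str.startswith (pvNormOf ck) "analyst" = true <;>
  by_cases hp : PySem.Str.startswith (pvNormOf ck) "play" = true <;>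
  simp only [ha, hp, if_true, if_false, Bool.false_eq_true, List.nil_append, List.append_nil] <;>
  (repeat rw [pvLoopA_append]) <;>
  simp only [pvLoopA_analyst, pvLoopA_play, pvLoopA_default, pvMatchFlatten]

-- ===== dict-lookup facts =====

theorem pvGet?_some_mem (vm : List (String × String)) (k v : String)
    (h : pvGet? vm k = some v) : (k, v) ∈ vm := by
  induction vm with
  | nil => simp [pvGet?] at h
  | cons kv rest ih =>
    obtain ⟨k0, v0⟩ := kv
    by_cases hk : k0 = k
    · simp [pvGet?, hk] at h; simp [hk, h]
    · simp [pvGet?, hk] at h; exact List.mem_cons_of_mem _ (ih h)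

theorem pvMem_get? (vm : List (String × String)) (hnd : (vm.map Prod.fst).Nodup)
    (k v : String) (h : (k, v) ∈ vm) : pvGet? vm k = some v := by
  induction vm with
  | nil => simp at h
  | cons kv rest ih =>
    obtain ⟨k0, v0⟩ := kv
    simp only [List.map_cons, List.nodup_cons] at hnd
    rcases List.mem_cons.mp h with heq | hmem
    · obtain ⟨h1, h2⟩ := Prod.mk.injEq .. ▸ heq
      injection heq with h1 h2
      subst h1; subst h2
      simp [pvGet?]
    · by_cases hk : k0 = k
      · exfalso
        exact hnd.1 (hk ▸ (List.mem_map.mpr ⟨(k, v), hmem, rfl⟩))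
      · simp [pvGet?, hk]
        exact ih hnd.2 hmem

theorem pvGetN?_some_mem (p : List (String × Nat)) (k : String) (r : Nat)
    (h : pvGetN? p k = some r) : (k, r) ∈ p := by
  induction p with
  | nil => simp [pvGetN?] at h
  | cons kr rest ih =>
    obtain ⟨k0, r0⟩ := kr
    by_cases hk : k0 = k
    · simp [pvGetN?, hk] at h; simp [hk, h]
    · simp [pvGetN?, hk] at h; exact List.mem_cons_of_mem _ (ih h)

theorem pvGetN?_none_iff (p : List (String × Nat)) (k : String) :
    pvGetN? p k = none ↔ k ∉ p.map Prod.fst := by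
  induction p with
  | nil => simp [pvGetN?]
  | cons kr rest ih =>
    obtain ⟨k0, r0⟩ := kr
    simp only [pvGetN?, List.map_cons, List.mem_cons]
    by_cases hk : k0 = k
    · simp [hk]
    · rw [if_neg hk, ih]
      constructor
      · intro h hc
        rcases hc with hc | hc
        · exact hk hc.symm
        · exact h hc
      · intro h hc
        exact h (Or.inr hc)

-- ===== merge (argmin) machinery for B's scan =====

def pvMerge (a b : Option (Nat × String)) : Option (Nat × String) :=
  match b with
  | none => a
  | some rv =>
    match a with
    | none => some rv
    | some rv0 => if rv.1 < rv0.1 then some rv else some rv0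

def pvCand (p : List (String × Nat)) (kv : String × String) : Option (Nat × String) :=
  if kv.2 = "" then none else (pvGetN? p kv.1).map (fun r => (r, kv.2))

theorem pvMerge_none_left (b : Option (Nat × String)) : pvMerge none b = b := by
  cases b <;> rfl

theorem pvMerge_assoc (a b c : Option (Nat × String)) :
    pvMerge (pvMerge a b) c = pvMerge a (pvMerge b c) := by
  rcases b with _ | ⟨rb, vb⟩
  · rw [show pvMerge a none = a from rfl, pvMerge_none_left]
  · rcases c with _ | ⟨rc, vc⟩
    · rfl
    · rcases a with _ | ⟨ra, va⟩
      · rw [pvMerge_none_left, pvMerge_none_left]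
      · by_cases h1 : rb < ra <;> by_cases h2 : rc < rb <;> by_cases h3 : rc < ra <;>
          simp [pvMerge, h1, h2, h3] <;> omega

theorem pvFoldl_merge_acc (l : List (Option (Nat × String))) (a : Option (Nat × String)) :
    List.foldl pvMerge a l = pvMerge a (List.foldl pvMerge none l) := by
  induction l generalizing a with
  | nil => cases a <;> rfl
  | cons x l' ih =>
    simp only [List.foldl_cons]
    rw [ih (pvMerge a x), ih (pvMerge none x), pvMerge_none_left, pvMerge_assoc]

theorem pvFold_result (l : List (Option (Nat × String))) (a : Option (Nat × String))
    (b : Nat × String) (h : List.foldl pvMerge a l = some b) : a = some b ∨ some b ∈ l := by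
  induction l generalizing a with
  | nil => exact Or.inl h
  | cons x l' ih =>
    simp only [List.foldl_cons] at h
    rcases ih _ h with hm | hm
    · rcases x with _ | ⟨rx, vx⟩ <;> rcases a with _ | ⟨ra, va⟩ <;> simp [pvMerge] at hm
      · simp [hm]
      · simp [hm]
      · split_ifs at hm <;> simp_all
    · exact Or.inr (List.mem_cons_of_mem _ hm)

theorem pvFoldMin (l : List (Option (Nat × String))) (a : Nat × String)
    (hmem : some a ∈ l)
    (hmin : ∀ b : Nat × String, some b ∈ l → a.1 ≤ b.1)
    (huniq : ∀ b : Nat × String, some b ∈ l → b.1 = a.1 → b = a) :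
    List.foldl pvMerge none l = some a := by
  induction l with
  | nil => simp at hmem
  | cons x l' ih =>
    simp only [List.foldl_cons, pvMerge_none_left]
    rw [pvFoldl_merge_acc]
    rcases List.mem_cons.mp hmem with hx | hmem'
    · subst hx
      cases hF : List.foldl pvMerge none l' with
      | none => rfl
      | some b =>
        rcases pvFold_result l' none b hF with h | h
        · simp at h
        · have hab := hmin b (List.mem_cons_of_mem _ h)
          simp only [pvMerge]
          rw [if_neg (by omega)]
    · have hF : List.foldl pvMerge none l' = some a :=
        ih hmem' (fun b hb => hmin b (List.mem_cons_of_mem _ hb))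
          (fun b hb => huniq b (List.mem_cons_of_mem _ hb))
      rw [hF]
      rcases x with _ | ⟨rc, vc⟩
      · rfl
      · by_cases hca : (rc, vc) = a
        · subst hca; simp [pvMerge]
        · have h1 := hmin (rc, vc) (List.mem_cons_self ..)
          have h2 : ¬ ((rc, vc).1 = a.1) := fun he => hca (huniq _ (List.mem_cons_self ..) he)
          simp only [pvMerge]
          rw [if_pos (by simp at h1 h2 ⊢; omega)]

theorem pvFold_none (l : List (Option (Nat × String))) :
    (∀ x ∈ l, x = none) → List.foldl pvMerge none l = none := by
  induction l with
  | nil => intro _; rfl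
  | cons x l' ih =>
    intro h
    rw [List.foldl_cons, h x (List.mem_cons_self ..)]
    exact ih (fun y hy => h y (List.mem_cons_of_mem _ hy))

theorem pvBest_foldl (vm : List (String × String)) (p : List (String × Nat))
    (b : Option (Nat × String)) :
    pvBest vm p b = List.foldl pvMerge b (vm.map (pvCand p)) := by
  induction vm generalizing b with
  | nil => rfl
  | cons kv rest ih =>
    obtain ⟨k, v⟩ := kv
    by_cases hv : v = ""
    · simp [pvBest, pvCand, hv, pvMerge, ih]
    · cases hg : pvGetN? p k with
      | none => simp [pvBest, pvCand, hv, hg, pvMerge, ih]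
      | some r =>
        simp only [pvBest, if_pos hv, hg, List.map_cons, List.foldl_cons, pvCand,
          if_neg hv, Option.map_some]
        rcases b with _ | ⟨rb, vb⟩
        · simp [pvMerge, ih]
        · by_cases hr : r < rb <;> simp [pvMerge, hr, ih]

theorem pvBest_congr (p q : List (String × Nat)) :
    ∀ (vm : List (String × String)) (b : Option (Nat × String)),
      (∀ kv ∈ vm, kv.2 ≠ "" → pvGetN? p kv.1 = pvGetN? q kv.1) →
      pvBest vm p b = pvBest vm q b := by
  intro vm
  induction vm with
  | nil => intro b _; rfl
  | cons kv rest ih =>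
    intro b h
    obtain ⟨k, v⟩ := kv
    have hrest : ∀ kv ∈ rest, kv.2 ≠ "" → pvGetN? p kv.1 = pvGetN? q kv.1 :=
      fun kv hm => h kv (List.mem_cons_of_mem _ hm)
    by_cases hv : v = ""
    · simp only [pvBest, if_neg (not_not_intro hv)]
      exact ih b hrest
    · have hk := h (k, v) (List.mem_cons_self ..) hv
      simp only [pvBest, if_pos hv, hk]
      cases pvGetN? q k with
      | none => exact ih b hrest
      | some r => exact ih _ hrest

-- ===== invariant of the built priority table =====

def pvInv (p : List (String × Nat)) : Prop :=
  List.Pairwise (fun a b => a.2 < b.2) p ∧ (p.map Prod.fst).Nodup ∧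
    (∀ kr ∈ p, kr.2 < p.length) ∧ (∀ kr ∈ p, kr.1 ≠ "")

theorem pvInv_nil : pvInv [] := by
  simp [pvInv]

theorem pvInv_append (p : List (String × Nat)) (k : String) (h : pvInv p) (hk : k ≠ "")
    (hnm : k ∉ p.map Prod.fst) : pvInv (p ++ [(k, p.length)]) := by
  obtain ⟨h1, h2, h3, h4⟩ := h
  refine ⟨?_, ?_, ?_, ?_⟩
  · rw [List.pairwise_append]
    exact ⟨h1, List.pairwise_singleton .., fun a ha b hb => by
      simp at hb; subst hb; exact h3 a ha⟩
  · simp only [List.map_append, List.map_cons, List.map_nil]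
    rw [List.nodup_append]
    simp only [h2, List.nodup_singleton, true_and]
    intro a ha b hb
    rw [List.mem_singleton] at hb
    subst hb
    exact fun he => hnm (he ▸ ha)
  · intro kr hkr
    simp only [List.length_append, List.length_cons, List.length_nil]
    rcases List.mem_append.mp hkr with hm | hm
    · have := h3 kr hm; omega
    · simp at hm; subst hm; simp
  · intro kr hkr
    rcases List.mem_append.mp hkr with hm | hm
    · exact h4 kr hm
    · simp at hm; subst hm; exact hk

theorem pvInv_foldl1 (l : List String) (p : List (String × Nat)) (h : pvInv p) :
    pvInv (List.foldl pvPrioAdd1 p l) := by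
  induction l generalizing p with
  | nil => exact h
  | cons k l' ih =>
    simp only [List.foldl_cons]
    unfold pvPrioAdd1
    split_ifs with hc
    · exact ih _ (pvInv_append p k h hc.1 ((pvGetN?_none_iff p k).mp hc.2))
    · exact ih _ h

theorem pvInv_foldl2 (l : List String) (p : List (String × Nat)) (hl : ∀ k ∈ l, k ≠ "")
    (h : pvInv p) : pvInv (List.foldl pvPrioAdd2 p l) := by
  induction l generalizing p with
  | nil => exact h
  | cons k l' ih =>
    have hl' : ∀ k ∈ l', k ≠ "" := fun k hk => hl k (List.mem_cons_of_mem _ hk)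
    simp only [List.foldl_cons]
    unfold pvPrioAdd2
    split_ifs with hc
    · exact ih _ hl' (pvInv_append p k h (hl k (List.mem_cons_self ..)) ((pvGetN?_none_iff p k).mp hc))
    · exact ih _ hl' h

-- ===== main lemma: B's single-pass argmin equals A's first-hit scan =====

theorem pvCand_some (p : List (String × Nat)) (kv : String × String) (r : Nat) (v : String)
    (h : pvCand p kv = some (r, v)) : kv.2 = v ∧ v ≠ "" ∧ pvGetN? p kv.1 = some r := by
  unfold pvCand at h
  split_ifs at h with h1
  simp at h
  exact ⟨h.2, h.2 ▸ h1, h.1⟩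

theorem pvBest_eq_loopA (p : List (String × Nat)) (vm : List (String × String))
    (hpw : List.Pairwise (fun a b => a.2 < b.2) p) (hnd : (p.map Prod.fst).Nodup)
    (hne : ∀ kr ∈ p, kr.1 ≠ "") (hvm : (vm.map Prod.fst).Nodup) :
    (pvBest vm p none).map Prod.snd = pvLoopA (p.map Prod.fst) vm := by
  induction p with
  | nil =>
    have h0 : pvBest vm [] none = none := by
      rw [pvBest_foldl]
      apply pvFold_none
      intro x hx
      obtain ⟨kv, _, hc⟩ := List.mem_map.mp hx
      simp [pvCand, pvGetN?] at hc
      exact hc.symm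
    simp [h0, pvLoopA]
  | cons kr p' ih =>
    obtain ⟨k0, r0⟩ := kr
    have hk0 : k0 ≠ "" := hne (k0, r0) (List.mem_cons_self ..)
    have hpw' := List.Pairwise.of_cons hpw
    have hhead : ∀ x ∈ p', r0 < x.2 := fun x hx => (List.pairwise_cons.mp hpw).1 x hx
    simp only [List.map_cons, List.nodup_cons] at hnd
    have hne' : ∀ kr ∈ p', kr.1 ≠ "" := fun kr hm => hne kr (List.mem_cons_of_mem _ hm)
    by_cases htr : ∃ v0, pvGet? vm k0 = some v0 ∧ v0 ≠ ""
    · obtain ⟨v0, hg, hv0⟩ := htr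
      have hRHS : pvLoopA (k0 :: p'.map Prod.fst) vm = some v0 := by
        simp [pvLoopA, hk0, hg, hv0]
      rw [List.map_cons, hRHS]
      have hLHS : pvBest vm ((k0, r0) :: p') none = some (r0, v0) := by
        rw [pvBest_foldl]
        apply pvFoldMin
        · exact List.mem_map.mpr ⟨(k0, v0), pvGet?_some_mem vm k0 v0 hg, by
            simp [pvCand, hv0, pvGetN?]⟩
        · rintro ⟨r, v⟩ hb
          obtain ⟨⟨k1, v1⟩, hm, hc⟩ := List.mem_map.mp hb
          obtain ⟨hv2, hvne, hg1⟩ := pvCand_some _ _ _ _ hc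
          show r0 ≤ r
          rcases List.mem_cons.mp (pvGetN?_some_mem _ _ _ hg1) with he | hm'
          · injection he with hk1 hr1
            omega
          · have hlt := hhead _ hm'
            simp at hlt
            omega
        · rintro ⟨r, v⟩ hb hr
          obtain ⟨⟨k1, v1⟩, hm, hc⟩ := List.mem_map.mp hb
          obtain ⟨hv2, hvne, hg1⟩ := pvCand_some _ _ _ _ hc
          have hr0 : r = r0 := hr
          subst hr0
          rcases List.mem_cons.mp (pvGetN?_some_mem _ _ _ hg1) with he | hm'
          · injection he with hk1 _
            subst hk1
            have hgv := pvMem_get? vm hvm _ v1 hm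
            rw [hg] at hgv
            injection hgv with hv
            simp only at hv2
            rw [← hv2, hv]
          · have hlt := hhead _ hm'
            simp at hlt
      rw [hLHS]
      rfl
    · push_neg at htr
      have hRHS : pvLoopA (k0 :: p'.map Prod.fst) vm = pvLoopA (p'.map Prod.fst) vm := by
        cases hg : pvGet? vm k0 with
        | none => simp [pvLoopA, hk0, hg]
        | some v =>
          have hv : v = "" := by
            by_contra hv; exact hv (htr v hg)
          simp [pvLoopA, hk0, hg, hv]
      have hLHS : pvBest vm ((k0, r0) :: p') none = pvBest vm p' none := by
        apply pvBest_congr _ _ vm none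
        rintro ⟨k1, v1⟩ hm hv1
        by_cases hk1 : k1 = k0
        · exfalso
          subst hk1
          have := pvMem_get? vm hvm k1 v1 hm
          exact hv1 (htr v1 this)
        · have hne2 : ¬ (k0 = k1) := fun h => hk1 h.symm
          simp [pvGetN?, hne2]
      rw [hLHS, List.map_cons, hRHS]
      exact ih hpw' hnd.2 hne'

-- ===== reducing A's candidate list to B's built priority keys =====

def pvFail (vm : List (String × String)) (k : String) : Prop :=
  k = "" ∨ pvGet? vm k = none ∨ pvGet? vm k = some ""

theorem pvLoopA_drop (vm : List (String × String)) (k : String) (l₁ l₂ : List String)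
    (h : k ∈ l₁ ∨ pvFail vm k) :
    pvLoopA (l₁ ++ k :: l₂) vm = pvLoopA (l₁ ++ l₂) vm := by
  induction l₁ with
  | nil =>
    rcases h with h | h
    · simp at h
    · rcases h with h | h | h
      · simp [pvLoopA, h]
      · by_cases hk : k = "" <;> simp [pvLoopA, hk, h]
      · by_cases hk : k = ""
        · simp [pvLoopA, hk]
        · simp [pvLoopA, hk, h]
  | cons a l₁' ih =>
    by_cases ha : a = ""
    · simp only [List.cons_append, pvLoopA, if_pos ha]
      rcases h with h | h
      · rcases List.mem_cons.mp h with he | hm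
        · exact ih (Or.inr (Or.inl (he ▸ ha)))
        · exact ih (Or.inl hm)
      · exact ih (Or.inr h)
    · cases hg : pvGet? vm a with
      | none =>
        simp only [List.cons_append, pvLoopA, if_neg ha, hg]
        rcases h with h | h
        · rcases List.mem_cons.mp h with he | hm
          · exact ih (Or.inr (Or.inr (Or.inl (he ▸ hg))))
          · exact ih (Or.inl hm)
        · exact ih (Or.inr h)
      | some v =>
        by_cases hv : v = ""
        · subst hv
          simp only [List.cons_append, pvLoopA, if_neg ha, hg]
          rcases h with h | h
          · rcases List.mem_cons.mp h with he | hm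
            · exact ih (Or.inr (Or.inr (Or.inr (he ▸ hg))))
            · exact ih (Or.inl hm)
          · exact ih (Or.inr h)
        · simp [pvLoopA, ha, hg, hv]

theorem pvLoopA_foldl_add2 (vm : List (String × String)) (l : List String)
    (p : List (String × Nat)) (s : List String) :
    pvLoopA ((List.foldl pvPrioAdd2 p l).map Prod.fst ++ s) vm =
      pvLoopA (p.map Prod.fst ++ (l ++ s)) vm := by
  induction l generalizing p with
  | nil => rfl
  | cons k l' ih =>
    rw [List.foldl_cons]
    by_cases hc : pvGetN? p k = none
    · rw [show pvPrioAdd2 p k = p ++ [(k, p.length)] from by simp only [pvPrioAdd2, if_pos hc]]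
      rw [ih]
      simp [List.append_assoc]
    · rw [show pvPrioAdd2 p k = p from by simp only [pvPrioAdd2, if_neg hc]]
      rw [ih]
      have hk : k ∈ p.map Prod.fst := by
        cases hg : pvGetN? p k with
        | none => exact absurd hg hc
        | some r => exact List.mem_map.mpr ⟨(k, r), pvGetN?_some_mem _ _ _ hg, rfl⟩
      exact (pvLoopA_drop vm k (p.map Prod.fst) (l' ++ s) (Or.inl hk)).symm

theorem pvLoopA_foldl_add1 (vm : List (String × String)) (l : List String)
    (p : List (String × Nat)) (s : List String) :
    pvLoopA ((List.foldl pvPrioAdd1 p l).map Prod.fst ++ s) vm =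
      pvLoopA (p.map Prod.fst ++ (l ++ s)) vm := by
  induction l generalizing p with
  | nil => rfl
  | cons k l' ih =>
    rw [List.foldl_cons]
    by_cases hc : k ≠ "" ∧ pvGetN? p k = none
    · rw [show pvPrioAdd1 p k = p ++ [(k, p.length)] from by simp only [pvPrioAdd1, if_pos hc]]
      rw [ih]
      simp [List.append_assoc]
    · rw [show pvPrioAdd1 p k = p from by simp only [pvPrioAdd1, if_neg hc]]
      rw [ih]
      by_cases hk : k = ""
      · exact (pvLoopA_drop vm k (p.map Prod.fst) (l' ++ s) (Or.inr (Or.inl hk))).symm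
      · have hg : k ∈ p.map Prod.fst := by
          cases hg : pvGetN? p k with
          | none => exact absurd ⟨hk, hg⟩ hc
          | some r => exact List.mem_map.mpr ⟨(k, r), pvGetN?_some_mem _ _ _ hg, rfl⟩
        exact (pvLoopA_drop vm k (p.map Prod.fst) (l' ++ s) (Or.inl hg)).symm

theorem pvLoopA_foldl_add2_nil (vm : List (String × String)) (l : List String)
    (p : List (String × Nat)) :
    pvLoopA ((List.foldl pvPrioAdd2 p l).map Prod.fst) vm = pvLoopA (p.map Prod.fst ++ l) vm := by
  have h := pvLoopA_foldl_add2 vm l p []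
  simpa using h

theorem pvLoopA_foldl_add1_s (vm : List (String × String)) (l s : List String) :
    pvLoopA ((List.foldl pvPrioAdd1 [] l).map Prod.fst ++ s) vm = pvLoopA (l ++ s) vm := by
  have h := pvLoopA_foldl_add1 vm l [] s
  simpa using h

-- flattening a match through Option.map (used to finish pvB_char)
theorem pvMatchOpt (o : Option (Nat × String)) (x : Option String) (d : String) :
    o.map Prod.snd = x →
    (match o with | some b => b.2 | none => d) = (match x with | some v => v | none => d) := by
  intro h
  subst h
  cases o <;> rfl

-- B's result is the same first-hit scan of the full candidate list, then the fallback value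
set_option maxHeartbeats 1000000 in
theorem pvB_char (ck : String) (vm : List (String × String)) (hvm : (vm.map Prod.fst).Nodup) :
    resolve_voice_id_alt ck vm =
      (match pvLoopA (pvCandsOf ck) vm with
       | some v => v
       | none => pvRest vm) := by
  unfold resolve_voice_id_alt
  simp only [show (if ck = "" then "" else PySem.Str.strip ck) = pvRawOf ck from rfl]
  simp only [show PySem.Str.replace (PySem.Str.replace (PySem.Str.replace
    (PySem.Str.lower (pvRawOf ck)) " " "") "_" "") "-" "" = pvNormOf ck from rfl]
  simp only [show ((if PySem.Str.startswith (pvNormOf ck) "analyst" then ["analyst", "color"] else []) ++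
    (if PySem.Str.startswith (pvNormOf ck) "play" then ["playByPlay", "playbyplay", "pbp"] else []) ++
    ["default"]) = pvFallbacksOf ck from rfl]
  have hfbne : ∀ k ∈ pvFallbacksOf ck, k ≠ "" := by
    intro k hk he
    subst he
    unfold pvFallbacksOf at hk
    split_ifs at hk <;> revert hk <;> decide
  obtain ⟨hpw, hnd, _, hne⟩ : pvInv (List.foldl pvPrioAdd2
      (List.foldl pvPrioAdd1 [] [pvRawOf ck, PySem.Str.lower (pvRawOf ck), pvNormOf ck])
      (pvFallbacksOf ck)) :=
    pvInv_foldl2 _ _ hfbne (pvInv_foldl1 _ _ pvInv_nil)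
  have hmain := pvBest_eq_loopA _ vm hpw hnd hne hvm
  have hred : pvLoopA ((List.foldl pvPrioAdd2
      (List.foldl pvPrioAdd1 [] [pvRawOf ck, PySem.Str.lower (pvRawOf ck), pvNormOf ck])
      (pvFallbacksOf ck)).map Prod.fst) vm = pvLoopA (pvCandsOf ck) vm := by
    rw [pvLoopA_foldl_add2_nil, pvLoopA_foldl_add1_s]
    rfl
  exact pvMatchOpt _ _ _ (hmain.trans hred)

-- ===== VERDICT (by name: the statement is the Claim_ definition above) =====
theorem resolve_voice_id_spec : Claim_equal_resolve_voice_id := by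
  intro ck vm _ hpre
  unfold Spec_resolve_voice_id
  rw [pvA_char, pvB_char ck vm hpre.2]
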